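-- pv_equiv track=rewrite | github.com/ravalrupalj/BrainTeasers | Edabit/Multi_division.py | abcmath
-- ===== SOURCE A (Python) =====
-- def abcmath(a, b, c):
--     t=a
--     for i in range(b):
--         t=t+t
--     if t%c==0:
--         return True
--     else:
--         return False
-- ===== SOURCE B (Python) =====
-- def abcmath(a, b, c):
--     # modular exponentiation instead of b repeated doublings
--     return a * pow(2, max(b, 0), c) % c == 0
-- ===== Notes on version B (the rewrite author's own statement) =====
-- stated objective: faster
-- what changed: Replaces the b-iteration doubling loop with a single modular exponentiation pow(2, max(b,0), c), checking (a*pow(2,max(b,0),c)) % c == 0.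
import Mathlib
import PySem

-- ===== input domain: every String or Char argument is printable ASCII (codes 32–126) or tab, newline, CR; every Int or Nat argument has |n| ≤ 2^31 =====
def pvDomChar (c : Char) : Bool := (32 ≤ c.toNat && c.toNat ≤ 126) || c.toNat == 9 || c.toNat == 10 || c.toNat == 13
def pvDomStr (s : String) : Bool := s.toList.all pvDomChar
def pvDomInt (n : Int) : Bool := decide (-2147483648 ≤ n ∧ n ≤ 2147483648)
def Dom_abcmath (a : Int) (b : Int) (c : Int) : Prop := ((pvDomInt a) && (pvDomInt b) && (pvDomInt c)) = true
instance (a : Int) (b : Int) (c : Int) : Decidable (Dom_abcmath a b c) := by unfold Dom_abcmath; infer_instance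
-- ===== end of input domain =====

-- B replaces A's b repeated doublings by one modular exponentiation (return value only; no side effects).

-- ===== PORT A =====
def abcmath (a : Int) (b : Int) (c : Int) : Bool :=
  let t := (PySem.List.pyRange 0 b 1).foldl (fun t _ => t + t) a
  if PySem.Int.mod t c = 0 then true else false

-- ===== PORT B =====
def abcmath_alt (a : Int) (b : Int) (c : Int) : Bool :=
  decide (PySem.Int.mod (a * PySem.Int.powMod 2 (max b 0).toNat c) c = 0)

-- ===== PRECONDITION & SPEC =====
-- Pre_ excludes exactly c = 0, on which A raises ZeroDivisionError (and B raises ValueError in pow).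
def Pre_abcmath (a : Int) (b : Int) (c : Int) : Prop := c ≠ 0
instance (a : Int) (b : Int) (c : Int) : Decidable (Pre_abcmath a b c) := by unfold Pre_abcmath; infer_instance
def pvWitness_abcmath : Int × Int × Int := (3, 2, 5)

def Spec_abcmath (a : Int) (b : Int) (c : Int) (out : Bool) : Prop := out = abcmath_alt a b c
instance (a : Int) (b : Int) (c : Int) (out : Bool) : Decidable (Spec_abcmath a b c out) := by unfold Spec_abcmath; infer_instance

-- ===== CLAIM =====
def Claim_equal_abcmath : Prop := ∀ (a : Int) (b : Int) (c : Int), Dom_abcmath a b c → Pre_abcmath a b c → Spec_abcmath a b c (abcmath a b c)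

-- ===== LEMMAS AND PROOFS =====

-- A's doubling loop multiplies by 2 once per element.
theorem foldl_double (l : List Int) (a : Int) :
    l.foldl (fun t _ => t + t) a = a * 2 ^ l.length := by
  induction l generalizing a with
  | nil => simp
  | cons x xs ih => simp [List.foldl, ih]; ring

-- divisibility is unchanged by reducing one factor mod c
theorem dvd_mul_mod_iff (a c x : Int) :
    (c ∣ a * PySem.Int.mod x c) ↔ (c ∣ a * x) := by
  have h := PySem.Int.floordiv_mul_add_mod x c
  constructor
  · intro hd
    have hx : a * x = a * PySem.Int.mod x c + (a * PySem.Int.floordiv x c) * c := by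
      conv_lhs => rw [← h]
      ring
    rw [hx]
    exact dvd_add hd (dvd_mul_left c _)
  · intro hd
    have hx : a * x = a * PySem.Int.mod x c + (a * PySem.Int.floordiv x c) * c := by
      conv_lhs => rw [← h]
      ring
    have hm : a * PySem.Int.mod x c = a * x - (a * PySem.Int.floordiv x c) * c := by
      linarith
    rw [hm]
    exact dvd_sub hd (dvd_mul_left c _)

-- ===== VERDICT =====
theorem abcmath_spec : Claim_equal_abcmath := by
  intro a b c _ hc
  unfold Spec_abcmath abcmath abcmath_alt
  have hn : (max b 0).toNat = b.toNat := by omega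
  have hlen : (PySem.List.pyRange 0 b 1).length = b.toNat := by
    rw [PySem.List.length_pyRange_one]; omega
  have key : PySem.Int.mod (a * 2 ^ b.toNat) c = 0 ↔
      PySem.Int.mod (a * PySem.Int.mod (2 ^ b.toNat) c) c = 0 := by
    rw [PySem.Int.mod_eq_zero_iff_dvd, PySem.Int.mod_eq_zero_iff_dvd, dvd_mul_mod_iff]
  rw [foldl_double, hlen, hn]
  by_cases h : PySem.Int.mod (a * 2 ^ b.toNat) c = 0 <;>
    simp [PySem.Int.powMod_eq, h, ← key]
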